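-- pv_equiv track=rewrite | github.com/coregee/adventofcode | 07.py | part1
-- ===== SOURCE A (Python) =====
-- from itertools import product
--
-- def part1(equations):
--     total = 0
--     operators = [
--         lambda x, y: x + y,
--         lambda x, y: x * y
--     ]
--     for key, values in equations.items():
--         operations_list = list(product(operators, repeat=len(values) - 1))
--         results = []
--         for operations in operations_list:
--             result = values[0]
--             for i in range(1, len(values)):
--                 result = operations[i-1](result, values[i])
--             results.append(result)
--         if key in results:
--             total += key
--     return total
-- ===== SOURCE B (Python) =====
-- def part1(equations):
--     total = 0
--     for key, values in equations.items():
--         reachable = {values[0]}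
--         for v in values[1:]:
--             reachable = {r + v for r in reachable} | {r * v for r in reachable}
--         if key in reachable:
--             total += key
--     return total
-- ===== Notes on version B (the rewrite author's own statement) =====
-- stated objective: alternative
-- what changed: Replaces the enumeration of all 2^(n-1) operator tuples (each re-evaluated left-to-right) by an incremental per-position DP over the set of reachable values, deduplicating as it goes.
import Mathlib
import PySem

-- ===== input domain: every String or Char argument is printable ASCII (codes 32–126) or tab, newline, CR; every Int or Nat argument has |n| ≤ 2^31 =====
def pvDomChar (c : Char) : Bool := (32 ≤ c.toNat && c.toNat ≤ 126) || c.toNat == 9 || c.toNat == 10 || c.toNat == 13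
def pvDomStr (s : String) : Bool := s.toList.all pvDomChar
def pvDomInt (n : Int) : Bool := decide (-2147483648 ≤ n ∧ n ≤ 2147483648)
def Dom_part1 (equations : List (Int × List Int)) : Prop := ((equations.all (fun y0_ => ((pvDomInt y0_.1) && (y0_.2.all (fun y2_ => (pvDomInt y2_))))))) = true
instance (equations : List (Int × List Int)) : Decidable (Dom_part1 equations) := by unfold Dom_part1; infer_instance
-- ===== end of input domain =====

-- B replaces A's enumeration of all operator tuples by an incremental reachable-value set DP per equation (alternative algorithm; equivalence proved on nonempty value lists).


-- ===== PORT A =====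
-- list(product(operators, repeat=n)) with operators = [+, *]; False = '+', True = '*'
def opProduct : Nat → List (List Bool)
  | 0 => [[]]
  | n + 1 => [false, true].flatMap (fun b => (opProduct n).map (fun t => b :: t))

-- the inner 'for i in range(1, len(values))' loop: ops and the tail of values walk in step
def applyOps : Int → List Bool → List Int → Int
  | r, op :: ops, v :: vs => applyOps (if op then r * v else r + v) ops vs
  | r, _, _ => r

def part1 (equations : List (Int × List Int)) : Int :=
  equations.foldl (fun total kv =>
    let values := kv.2
    let operationsList := opProduct (values.length - 1)
    let results := operationsList.map (fun ops => applyOps (values.headD 0) ops values.tail)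
    if kv.1 ∈ results then total + kv.1 else total) 0

-- ===== PORT B =====
def part1_alt (equations : List (Int × List Int)) : Int :=
  equations.foldl (fun total kv =>
    let reach := kv.2.tail.foldl (fun s v =>
      PySem.Set.union (PySem.Set.ofList (s.map (fun r => r + v))) (s.map (fun r => r * v)))
      (PySem.Set.ofList [kv.2.headD 0])
    if PySem.Set.contains reach kv.1 then total + kv.1 else total) 0

-- ===== PRECONDITION & SPEC =====
-- Pre_ excludes equations with an empty value list: there A raises ValueError (product with repeat=-1).
def Pre_part1 (equations : List (Int × List Int)) : Prop :=
  ∀ kv ∈ equations, kv.2 ≠ []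
instance (equations : List (Int × List Int)) : Decidable (Pre_part1 equations) := by unfold Pre_part1; infer_instance
def pvWitness_part1 : (List (Int × List Int)) := [(5, [2, 3]), (7, [1, 2, 3])]

def Spec_part1 (equations : List (Int × List Int)) (out : Int) : Prop := out = part1_alt equations
instance (equations : List (Int × List Int)) (out : Int) : Decidable (Spec_part1 equations out) := by unfold Spec_part1; infer_instance

-- ===== CLAIM (what is proved, stated in full; the proofs are below) =====
def Claim_equal_part1 : Prop := ∀ (equations : List (Int × List Int)), Dom_part1 equations → Pre_part1 equations → Spec_part1 equations (part1 equations)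

-- ===== LEMMAS AND PROOFS =====

-- A's list of all results from seed r over vs
def resultsFrom (r : Int) (vs : List Int) : List Int :=
  (opProduct vs.length).map (fun ops => applyOps r ops vs)

theorem mem_resultsFrom_cons (x r v : Int) (vs : List Int) :
    x ∈ resultsFrom r (v :: vs) ↔ x ∈ resultsFrom (r + v) vs ∨ x ∈ resultsFrom (r * v) vs := by
  simp [resultsFrom, opProduct, applyOps]
-- invariant of B's fold: membership in the DP set = reachable from some seed in the frontier
theorem mem_reach_fold (vs : List Int) (s : List Int) (x : Int) :
    (x ∈ vs.foldl (fun s v =>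
      PySem.Set.union (PySem.Set.ofList (s.map (fun r => r + v))) (s.map (fun r => r * v))) s)
      ↔ ∃ r ∈ s, x ∈ resultsFrom r vs := by
  induction vs generalizing s with
  | nil => simp [resultsFrom, opProduct, applyOps]
  | cons v vs ih =>
      simp only [List.foldl_cons, ih, PySem.Set.mem_union, PySem.Set.mem_ofList, List.mem_map]
      constructor
      · rintro ⟨r, (⟨r', hr', rfl⟩ | ⟨r', hr', rfl⟩), hx⟩
        · exact ⟨r', hr', (mem_resultsFrom_cons x r' v vs).2 (Or.inl hx)⟩
        · exact ⟨r', hr', (mem_resultsFrom_cons x r' v vs).2 (Or.inr hx)⟩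
      · rintro ⟨r, hr, hx⟩
        rcases (mem_resultsFrom_cons x r v vs).1 hx with h | h
        · exact ⟨r + v, Or.inl ⟨r, hr, rfl⟩, h⟩
        · exact ⟨r * v, Or.inr ⟨r, hr, rfl⟩, h⟩

theorem per_equation (kv : Int × List Int) (h : kv.2 ≠ []) :
    (kv.1 ∈ (opProduct (kv.2.length - 1)).map (fun ops => applyOps (kv.2.headD 0) ops kv.2.tail))
      ↔ (PySem.Set.contains (kv.2.tail.foldl (fun s v =>
          PySem.Set.union (PySem.Set.ofList (s.map (fun r => r + v))) (s.map (fun r => r * v)))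
          (PySem.Set.ofList [kv.2.headD 0])) kv.1 = true) := by
  obtain ⟨v0, vs, hv⟩ : ∃ v0 vs, kv.2 = v0 :: vs := by
    cases hkv : kv.2 with
    | nil => exact absurd hkv h
    | cons a l => exact ⟨a, l, rfl⟩
  rw [PySem.Set.contains_iff, mem_reach_fold]
  simp [hv, resultsFrom]

theorem fold_eq (l : List (Int × List Int)) (h : Pre_part1 l) (init : Int) :
    l.foldl (fun total kv =>
      let values := kv.2
      let operationsList := opProduct (values.length - 1)
      let results := operationsList.map (fun ops => applyOps (values.headD 0) ops values.tail)
      if kv.1 ∈ results then total + kv.1 else total) init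
    = l.foldl (fun total kv =>
      let reach := kv.2.tail.foldl (fun s v =>
        PySem.Set.union (PySem.Set.ofList (s.map (fun r => r + v))) (s.map (fun r => r * v)))
        (PySem.Set.ofList [kv.2.headD 0])
      if PySem.Set.contains reach kv.1 then total + kv.1 else total) init := by
  induction l generalizing init with
  | nil => rfl
  | cons kv rest ih =>
      have hkv : kv.2 ≠ [] := h kv (List.mem_cons_self)
      have hrest : Pre_part1 rest := fun p hp => h p (List.mem_cons_of_mem _ hp)
      simp only [List.foldl_cons]
      rw [ih hrest]
      congr 1
      have hmem := (per_equation kv hkv).trans (PySem.Set.contains_iff _ _)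
      simp only [List.mem_map] at hmem
      split_ifs with h1 h2 <;> simp_all

-- ===== VERDICT (by name: the statement is the Claim_ definition above) =====
theorem part1_spec : Claim_equal_part1 := by
  intro equations _ hpre
  unfold Spec_part1 part1 part1_alt
  exact fold_eq equations hpre 0
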